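-- pv_equiv track=rewrite | github.com/ZCDu/Comfyui-docker | get_requirments.py | detecting_special_case
-- ===== SOURCE A (Python) =====
-- def detecting_special_case(rqs_getting_list, special_rqs_set):
--     rqs_getting_list_len = len(rqs_getting_list)
--     i = rqs_getting_list_len - 1
--     while i >= 0:
--         if bool(rqs_getting_list[i]) == False:
--             rqs_getting_list.pop(i)
--             i = i - 1
--         elif rqs_getting_list[i][0] == "#":
--             rqs_getting_list.pop(i)
--             i = i - 1
--         elif "sys_platform" in rqs_getting_list[i]:
--             special_rqs_set.add(rqs_getting_list[i])
--             rqs_getting_list.pop(i)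
--             i = i - 1
--         elif "--extra-index" in rqs_getting_list[i]:
--             str_added = rqs_getting_list[i - 1] + "\n" + rqs_getting_list[i]
--             special_rqs_set.add(str_added)
--             rqs_getting_list.pop(i)
--             rqs_getting_list.pop(i - 1)
--             i = i - 2
--         elif "git+https" in rqs_getting_list[i]:
--             special_rqs_set.add(rqs_getting_list[i])
--             rqs_getting_list.pop(i)
--             i = i - 1
--         else:
--             i = i - 1
--     return rqs_getting_list, special_rqs_set
-- ===== SOURCE B (Python) =====
-- def detecting_special_case(rqs_getting_list, special_rqs_set):
--     # Single backward pass over the (unmutated) input, collecting kept lines;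
--     # an "--extra-index" line consumes the preceding original line as its partner.
--     kept = []
--     i = len(rqs_getting_list) - 1
--     while i >= 0:
--         line = rqs_getting_list[i]
--         if not line or line[0] == "#":
--             pass
--         elif "sys_platform" in line:
--             special_rqs_set.add(line)
--         elif "--extra-index" in line:
--             special_rqs_set.add(rqs_getting_list[i - 1] + "\n" + line)
--             i -= 1
--         elif "git+https" in line:
--             special_rqs_set.add(line)
--         else:
--             kept.append(line)
--         i -= 1
--     kept.reverse()
--     return kept, special_rqs_set
-- ===== Notes on version B (the rewrite author's own statement) =====
-- stated objective: alternative
-- what changed: B replaces A's in-place pop(i) loop over a mutating list with a single backward pass over the unmodified input that collects kept lines into a new list (extra-index lines consume the preceding original line by skipping an index); no element-shifting pops.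
import Mathlib
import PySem

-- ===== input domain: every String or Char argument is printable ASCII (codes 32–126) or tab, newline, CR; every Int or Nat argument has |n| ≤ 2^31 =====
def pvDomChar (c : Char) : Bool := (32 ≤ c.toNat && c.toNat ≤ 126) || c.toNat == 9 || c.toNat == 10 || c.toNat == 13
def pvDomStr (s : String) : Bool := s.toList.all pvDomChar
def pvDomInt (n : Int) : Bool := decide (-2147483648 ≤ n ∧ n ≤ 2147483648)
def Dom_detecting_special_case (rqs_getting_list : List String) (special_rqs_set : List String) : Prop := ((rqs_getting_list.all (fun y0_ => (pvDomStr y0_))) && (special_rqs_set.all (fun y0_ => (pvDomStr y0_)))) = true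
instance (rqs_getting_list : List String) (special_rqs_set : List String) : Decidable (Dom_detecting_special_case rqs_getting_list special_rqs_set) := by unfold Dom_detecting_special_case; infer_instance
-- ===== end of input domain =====

-- B replaces A's in-place pop(i) loop over a mutating list with a single backward pass over the
-- unmodified input collecting kept lines into a fresh list (alternative structure, similar cost);
-- A mutates rqs_getting_list in place, B does not — the equivalence proved is about the return value.


-- ===== PORT A =====
-- while i >= 0: classify lst[i], pop removed lines in place, i -= 1 (or 2 for --extra-index).
-- A 'none' from pyGet?/pop? is Python's IndexError; the sentinel return there is outside Pre_.
def dscLoopA (fuel : Nat) (lst : List String) (s : List String) (i : Int) : List String × List String :=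
  match fuel with
  | 0 => (lst, s)          -- fuel = remaining iterations + 1; never exhausted on reachable calls
  | fuel + 1 =>
  if i < 0 then (lst, s) else
    match PySem.List.pyGet? lst i with
    | none => (lst, s)      -- IndexError (unreachable on A's actual runs)
    | some x =>
      if PySem.Str.len x == 0 then
        match PySem.List.pop? lst i with
        | none => (lst, s)
        | some (_, r) => dscLoopA fuel r s (i - 1)
      else if PySem.Str.pyGet? x 0 == some '#' then
        match PySem.List.pop? lst i with
        | none => (lst, s)
        | some (_, r) => dscLoopA fuel r s (i - 1)
      else if PySem.Str.isIn "sys_platform" x then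
        match PySem.List.pop? lst i with
        | none => (lst, PySem.Set.add s x)
        | some (_, r) => dscLoopA fuel r (PySem.Set.add s x) (i - 1)
      else if PySem.Str.isIn "--extra-index" x then
        match PySem.List.pyGet? lst (i - 1) with
        | none => (lst, s)  -- IndexError
        | some prev =>
          let s' := PySem.Set.add s (prev ++ "\n" ++ x)
          match PySem.List.pop? lst i with
          | none => (lst, s')
          | some (_, r1) =>
            match PySem.List.pop? r1 (i - 1) with
            | none => (r1, s')  -- IndexError (the excluded wraparound corner)
            | some (_, r2) => dscLoopA fuel r2 s' (i - 2)
      else if PySem.Str.isIn "git+https" x then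
        match PySem.List.pop? lst i with
        | none => (lst, PySem.Set.add s x)
        | some (_, r) => dscLoopA fuel r (PySem.Set.add s x) (i - 1)
      else dscLoopA fuel lst s (i - 1)

def detecting_special_case (rqs_getting_list : List String) (special_rqs_set : List String) : List String × List String :=
  dscLoopA (rqs_getting_list.length + 1) rqs_getting_list special_rqs_set ((rqs_getting_list.length : Int) - 1)

-- ===== PORT B =====
-- single backward pass over the unmodified input; kept lines are appended and reversed at the end.
def dscLoopB (fuel : Nat) (lst : List String) (s : List String) (kept : List String) (i : Int) : List String × List String :=
  match fuel with
  | 0 => (kept.reverse, s) -- fuel = remaining iterations + 1; never exhausted on reachable calls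
  | fuel + 1 =>
  if i < 0 then (kept.reverse, s) else
    match PySem.List.pyGet? lst i with
    | none => (kept.reverse, s)   -- unreachable: 0 ≤ i < len lst on every call
    | some line =>
      if PySem.Str.len line == 0 || PySem.Str.pyGet? line 0 == some '#' then
        dscLoopB fuel lst s kept (i - 1)
      else if PySem.Str.isIn "sys_platform" line then
        dscLoopB fuel lst (PySem.Set.add s line) kept (i - 1)
      else if PySem.Str.isIn "--extra-index" line then
        match PySem.List.pyGet? lst (i - 1) with
        | none => (kept.reverse, s)  -- unreachable: lst is nonempty here
        | some prev => dscLoopB fuel lst (PySem.Set.add s (prev ++ "\n" ++ line)) kept (i - 2)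
      else if PySem.Str.isIn "git+https" line then
        dscLoopB fuel lst (PySem.Set.add s line) kept (i - 1)
      else dscLoopB fuel lst s (kept ++ [line]) (i - 1)

def detecting_special_case_alt (rqs_getting_list : List String) (special_rqs_set : List String) : List String × List String :=
  dscLoopB (rqs_getting_list.length + 1) rqs_getting_list special_rqs_set [] ((rqs_getting_list.length : Int) - 1)

-- ===== PRECONDITION & SPEC =====
-- eiHead x: line x would take A's "--extra-index" branch.
def eiHead (x : String) : Bool :=
  !(PySem.Str.len x == 0) && !(PySem.Str.pyGet? x 0 == some '#') &&
  !(PySem.Str.isIn "sys_platform" x) && PySem.Str.isIn "--extra-index" x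

-- Pre_ excludes lists whose FIRST line is an "--extra-index" special line: there A's in-place
-- pops make rqs_getting_list[i-1]/pop(i-1) wrap around (negative index) into the mutated list,
-- raising IndexError when no other line survives and otherwise pairing the first line with the
-- mutated list's LAST element; B pairs it with the original last line instead.
def Pre_detecting_special_case (rqs_getting_list : List String) (special_rqs_set : List String) : Prop :=
  eiHead (rqs_getting_list.headD "") = false

instance (rqs_getting_list : List String) (special_rqs_set : List String) : Decidable (Pre_detecting_special_case rqs_getting_list special_rqs_set) := by unfold Pre_detecting_special_case; infer_instance

def pvWitness_detecting_special_case : List String × List String :=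
  ([], [])

def Spec_detecting_special_case (rqs_getting_list : List String) (special_rqs_set : List String) (out : List String × List String) : Prop := out = detecting_special_case_alt rqs_getting_list special_rqs_set
instance (rqs_getting_list : List String) (special_rqs_set : List String) (out : List String × List String) : Decidable (Spec_detecting_special_case rqs_getting_list special_rqs_set out) := by unfold Spec_detecting_special_case; infer_instance

-- ===== CLAIM (what is proved, stated in full; the proofs are below) =====
def Claim_equal_detecting_special_case : Prop := ∀ (rqs_getting_list : List String) (special_rqs_set : List String), Dom_detecting_special_case rqs_getting_list special_rqs_set → Pre_detecting_special_case rqs_getting_list special_rqs_set → Spec_detecting_special_case rqs_getting_list special_rqs_set (detecting_special_case rqs_getting_list special_rqs_set)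

-- ===== LEMMAS AND PROOFS =====

-- dropping the last element keeps a non-ei head (a dropped head becomes "", which is not ei)
lemma eiHead_headD_dropLastLike (pre' : List String) (x : String)
    (hP : eiHead ((pre' ++ [x]).headD "") = false) : eiHead (pre'.headD "") = false := by
  cases pre' with
  | nil => simp [eiHead, PySem.Str.len]
  | cons a t => simpa using hP

lemma getAt (pre : List String) (x : String) (t : List String) :
    PySem.List.pyGet? (pre ++ x :: t) ((pre.length : Int)) = some x :=
  PySem.List.pyGet?_append_length pre t x

lemma popAt (pre : List String) (x : String) (t : List String) :
    PySem.List.pop? (pre ++ x :: t) ((pre.length : Int)) = some (x, pre ++ t) := by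
  rw [PySem.List.pop?_natCast (pre ++ x :: t) pre.length (by simp)]
  have h1 : (pre ++ x :: t)[pre.length] = x := by simp
  have h2 : (pre ++ x :: t).eraseIdx pre.length = pre ++ t := by
    induction pre with
    | nil => simp
    | cons a p ih => simp [ih]
  rw [h1, h2]

-- main invariant: A's loop on (untouched prefix ++ already-kept tail K) agrees with B's loop
lemma key : ∀ (n : Nat) (pre rest K s kept : List String) (fa fb : Nat), pre.length = n →
    n ≤ fa → n ≤ fb →
    eiHead (pre.headD "") = false →
    ∃ X S, dscLoopA fa (pre ++ K) s ((n : Int) - 1) = (X ++ K, S) ∧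
           dscLoopB fb (pre ++ rest) s kept ((n : Int) - 1) = (X ++ kept.reverse, S) := by
  intro n
  induction n using Nat.strong_induction_on with
  | _ n IH =>
    intro pre rest K s kept fa fb hn hfa hfb hP
    subst hn
    rcases List.eq_nil_or_concat pre with rfl | ⟨pre', x, rfl⟩
    · refine ⟨[], s, ?_, ?_⟩
      · cases fa with
        | zero => rw [dscLoopA]
        | succ f => rw [dscLoopA, if_pos (by simp)]
      · cases fb with
        | zero => rw [dscLoopB]; simp
        | succ f => rw [dscLoopB, if_pos (by simp)]; simp
    rw [List.concat_eq_append] at *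
    have hidx : ((pre' ++ [x]).length : Int) - 1 = (pre'.length : Int) := by simp
    have hcK : pre' ++ [x] ++ K = pre' ++ x :: K := by simp
    have hcR : pre' ++ [x] ++ rest = pre' ++ x :: rest := by simp
    rw [hidx, hcK, hcR]
    have hP' : eiHead (pre'.headD "") = false := eiHead_headD_dropLastLike pre' x hP
    have hlt : pre'.length < (pre' ++ [x]).length := by simp
    obtain ⟨a, rfl⟩ : ∃ a, fa = a + 1 := by
      cases fa with
      | zero => exfalso; simp at hfa
      | succ a => exact ⟨a, rfl⟩
    obtain ⟨b, rfl⟩ : ∃ b, fb = b + 1 := by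
      cases fb with
      | zero => exfalso; simp at hfb
      | succ b => exact ⟨b, rfl⟩
    have hfa' : pre'.length ≤ a := by simp at hfa; omega
    have hfb' : pre'.length ≤ b := by simp at hfb; omega
    by_cases h1 : (PySem.Str.len x == 0) = true
    · obtain ⟨X, S, hA, hB⟩ := IH pre'.length hlt pre' (x :: rest) K s kept a b rfl hfa' hfb' hP'
      refine ⟨X, S, ?_, ?_⟩
      · rw [dscLoopA, if_neg (by omega), getAt]
        simp only [h1, if_true, popAt, hA]
      · rw [dscLoopB, if_neg (by omega), getAt]
        simp only [h1, Bool.true_or, if_true]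
        rw [show pre' ++ x :: rest = pre' ++ (x :: rest) from rfl] at hB ⊢
        exact hB
    · have h1' : (PySem.Str.len x == 0) = false := by simpa using h1
      by_cases h2 : (PySem.Str.pyGet? x 0 == some '#') = true
      · obtain ⟨X, S, hA, hB⟩ := IH pre'.length hlt pre' (x :: rest) K s kept a b rfl hfa' hfb' hP'
        refine ⟨X, S, ?_, ?_⟩
        · rw [dscLoopA, if_neg (by omega), getAt]
          simp only [h1', h2, Bool.false_eq_true, if_false, if_true, popAt, hA]
        · rw [dscLoopB, if_neg (by omega), getAt]
          simp only [h1', h2, Bool.false_or, if_true]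
          exact hB
      · have h2' : (PySem.Str.pyGet? x 0 == some '#') = false := by simpa using h2
        by_cases h3 : (PySem.Str.isIn "sys_platform" x) = true
        · obtain ⟨X, S, hA, hB⟩ :=
            IH pre'.length hlt pre' (x :: rest) K (PySem.Set.add s x) kept a b rfl hfa' hfb' hP'
          refine ⟨X, S, ?_, ?_⟩
          · rw [dscLoopA, if_neg (by omega), getAt]
            simp only [h1', h2', h3, Bool.false_eq_true, if_false, if_true, popAt, hA]
          · rw [dscLoopB, if_neg (by omega), getAt]
            simp only [h1', h2', h3, Bool.false_or, Bool.false_eq_true, if_false, if_true]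
            exact hB
        · have h3' : (PySem.Str.isIn "sys_platform" x) = false := by simpa using h3
          by_cases h4 : (PySem.Str.isIn "--extra-index" x) = true
          · -- the extra-index pair: pre' cannot be empty (Pre_ forbids an ei head)
            rcases List.eq_nil_or_concat pre' with rfl | ⟨pre'', p, rfl⟩
            · exfalso
              simp only [List.nil_append, List.headD_cons] at hP
              have hei : eiHead x = true := by
                unfold eiHead; rw [h1', h2', h3', h4]; rfl
              rw [hei] at hP
              simp at hP
            rw [List.concat_eq_append] at *
            have hP'' : eiHead (pre''.headD "") = false :=
              eiHead_headD_dropLastLike pre'' p hP'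
            have hlt2 : pre''.length < (pre'' ++ [p] ++ [x]).length := by simp
            obtain ⟨X, S, hA, hB⟩ :=
              IH pre''.length hlt2 pre'' (p :: x :: rest) K
                (PySem.Set.add s (p ++ "\n" ++ x)) kept a b rfl
                (by simp at hfa'; omega) (by simp at hfb'; omega) hP''
            have hidx2 : ((pre'' ++ [p]).length : Int) - 1 = (pre''.length : Int) := by simp
            have hgp : PySem.List.pyGet? (pre'' ++ [p] ++ x :: K) ((pre''.length : Int))
                = some p := by
              rw [List.append_assoc, List.singleton_append]; exact getAt pre'' p (x :: K)
            have hgpR : PySem.List.pyGet? (pre'' ++ [p] ++ x :: rest) ((pre''.length : Int))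
                = some p := by
              rw [List.append_assoc, List.singleton_append]; exact getAt pre'' p (x :: rest)
            have hpop1 : PySem.List.pop? (pre'' ++ [p] ++ x :: K) (((pre'' ++ [p]).length : Int))
                = some (x, (pre'' ++ [p]) ++ K) := popAt (pre'' ++ [p]) x K
            have hpop2 : PySem.List.pop? ((pre'' ++ [p]) ++ K) ((pre''.length : Int))
                = some (p, pre'' ++ K) := by
              rw [List.append_assoc, List.singleton_append]; exact popAt pre'' p K
            refine ⟨X, S, ?_, ?_⟩
            · rw [dscLoopA, if_neg (by omega), getAt]
              simp only [h1', h2', h3', h4, Bool.false_eq_true, if_false, if_true, hidx2, hgp,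
                hpop1, hpop2]
              have hi3 : ((pre'' ++ [p]).length : Int) - 2 = (pre''.length : Int) - 1 := by
                simp; omega
              rw [hi3, hA]
            · rw [dscLoopB, if_neg (by omega), getAt]
              simp only [h1', h2', h3', h4, Bool.false_or, Bool.false_eq_true, if_false, if_true,
                hidx2, hgpR]
              have hi3 : ((pre'' ++ [p]).length : Int) - 2 = (pre''.length : Int) - 1 := by
                simp; omega
              rw [hi3]
              simpa using hB
          · have h4' : (PySem.Str.isIn "--extra-index" x) = false := by simpa using h4
            by_cases h5 : (PySem.Str.isIn "git+https" x) = true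
            · obtain ⟨X, S, hA, hB⟩ :=
                IH pre'.length hlt pre' (x :: rest) K (PySem.Set.add s x) kept a b rfl hfa' hfb' hP'
              refine ⟨X, S, ?_, ?_⟩
              · rw [dscLoopA, if_neg (by omega), getAt]
                simp only [h1', h2', h3', h4', h5, Bool.false_eq_true, if_false, if_true, popAt,
                  hA]
              · rw [dscLoopB, if_neg (by omega), getAt]
                simp only [h1', h2', h3', h4', h5, Bool.false_or, Bool.false_eq_true, if_false,
                  if_true]
                exact hB
            · have h5' : (PySem.Str.isIn "git+https" x) = false := by simpa using h5
              obtain ⟨X, S, hA, hB⟩ :=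
                IH pre'.length hlt pre' (x :: rest) (x :: K) s (kept ++ [x]) a b rfl hfa' hfb' hP'
              refine ⟨X ++ [x], S, ?_, ?_⟩
              · rw [dscLoopA, if_neg (by omega), getAt]
                simp only [h1', h2', h3', h4', h5', Bool.false_eq_true, if_false]
                rw [show pre' ++ x :: K = pre' ++ (x :: K) from rfl, hA]
                simp
              · rw [dscLoopB, if_neg (by omega), getAt]
                simp only [h1', h2', h3', h4', h5', Bool.false_or, Bool.false_eq_true, if_false]
                rw [hB]
                simp

-- ===== VERDICT (by name: the statement is the Claim_ definition above) =====
theorem detecting_special_case_spec : Claim_equal_detecting_special_case := by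
  intro lst s _hD hP
  unfold Spec_detecting_special_case detecting_special_case detecting_special_case_alt
  obtain ⟨X, S, hA, hB⟩ := key lst.length lst [] [] s [] (lst.length + 1) (lst.length + 1) rfl (by omega) (by omega) hP
  simp only [List.append_nil] at hA hB
  rw [hA, hB]; simp
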